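-- pv_equiv track=rewrite | github.com/ByteRogue/generating-formulars | main.py | parse
-- ===== SOURCE A (Python) =====
-- READ = 0
--
-- def parse(expression):
--     if expression == '%':
--         return 'get_data(-1)'
--     if expression.startswith('`'):
--         return expression[1:]
--     if expression.startswith('@'):
--         return 'get_data("%s")' % (expression[1:])
--     if ':' in expression:
--         return 'get_data(\'%s\')' % (expression)
--     if '>' in expression:
--         nums = expression.split('>')
--         a = 'get_data('+nums[0]+')'
--         b = 'get_data('+nums[1]+')'
--         return '('+a+' > '+b+' ? '+a+' : \'\')'
--     elif '^' in expression:
--         nums = expression.split('^')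
--         a = 'get_data('+nums[0]+')'
--         b = 'get_data('+nums[1]+')'
--         return '('+a+' ? '+a+' : '+b+')'
--     calculation = ''
--     stack = []
--     val = ''
--     state = READ
--     number = False
--     cmd = ''
--     b1 = b2 = 0
--     for c in expression:
--
--         if c.isdigit():
--             val+=c
--         elif c.isalpha():
--             cmd+=c
--         elif c == '#':
--             number = True
--
--         elif c in ('+','-','*','(',')',','):
--             if number:
--                 calculation+=val
--                 number = False
--             else:
--                 if cmd:
--                     calculation+=cmd
--                     cmd =''
--                 else:
--                     calculation+='get_data('+val+')'
--             calculation += ' '+c+' '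
--             val = ''
--         elif c=='|':
--
--             calculation+='get_data('+val+')'
--             calculation += '.\' \'.'
--             val=''
--             number=False
--
--     if val:
--         if number:
--             calculation+=val
--         else:
--             calculation+='get_data('+val+')'
--     return '('+calculation+')'
-- ===== SOURCE B (Python) =====
-- READ = 0
--
-- def _lex(expression):
--     """Tokenize into digit-runs, alpha-runs, '#', operators and '|'; other chars dropped."""
--     toks = []
--     i, n = 0, len(expression)
--     while i < n:
--         c = expression[i]
--         if c.isdigit():
--             j = i + 1
--             while j < n and expression[j].isdigit():
--                 j += 1
--             toks.append(('num', expression[i:j]))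
--             i = j
--         elif c.isalpha():
--             j = i + 1
--             while j < n and expression[j].isalpha():
--                 j += 1
--             toks.append(('word', expression[i:j]))
--             i = j
--         else:
--             if c == '#':
--                 toks.append(('hash', ''))
--             elif c in '+-*(),':
--                 toks.append(('op', c))
--             elif c == '|':
--                 toks.append(('bar', ''))
--             i += 1
--     return toks
--
-- def parse(expression):
--     if expression == '%':
--         return 'get_data(-1)'
--     head, rest = expression[:1], expression[1:]
--     if head == '`':
--         return rest
--     if head == '@':
--         return 'get_data("%s")' % rest
--     if ':' in expression:
--         return "get_data('%s')" % expression
--     for sep in '>^':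
--         if sep in expression:
--             parts = expression.split(sep)
--             a = 'get_data(%s)' % parts[0]
--             b = 'get_data(%s)' % parts[1]
--             if sep == '>':
--                 return "(%s > %s ? %s : '')" % (a, b, a)
--             return '(%s ? %s : %s)' % (a, a, b)
--     calculation = ''
--     val = ''
--     cmd = ''
--     number = False
--     for kind, text in _lex(expression):
--         if kind == 'num':
--             val += text
--         elif kind == 'word':
--             cmd += text
--         elif kind == 'hash':
--             number = True
--         elif kind == 'op':
--             if number:
--                 calculation += val
--                 number = False
--             elif cmd:
--                 calculation += cmd
--                 cmd = ''
--             else: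
--                 calculation += 'get_data(' + val + ')'
--             calculation += ' ' + text + ' '
--             val = ''
--         else:  # bar
--             calculation += 'get_data(' + val + ')' + ".' '."
--             val = ''
--             number = False
--     if val:
--         calculation += val if number else 'get_data(' + val + ')'
--     return '(%s)' % calculation
-- ===== Notes on version B (the rewrite author's own statement) =====
-- stated objective: alternative
-- what changed: A's single interleaved character scan is replaced by two passes (a lexer producing digit-run/alpha-run/'#'/operator/'|' tokens, then a fold over the token list), and the guard clauses are restructured (prefix slicing and a loop over the two comparison separators).
import Mathlib
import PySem

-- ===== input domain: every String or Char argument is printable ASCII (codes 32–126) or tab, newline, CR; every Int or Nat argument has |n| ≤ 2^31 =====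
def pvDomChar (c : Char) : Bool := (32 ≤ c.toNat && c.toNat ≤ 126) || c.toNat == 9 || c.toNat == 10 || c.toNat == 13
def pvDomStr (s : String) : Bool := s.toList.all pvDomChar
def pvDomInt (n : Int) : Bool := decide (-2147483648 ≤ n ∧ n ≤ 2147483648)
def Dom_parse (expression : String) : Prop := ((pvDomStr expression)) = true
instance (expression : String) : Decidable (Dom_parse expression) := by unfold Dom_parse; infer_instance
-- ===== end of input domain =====

-- B replaces A's single interleaved character scan by two passes (lex into run-tokens, then fold
-- over tokens) and restructures the guard clauses; objective: alternative decomposition, same cost.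

-- char classes, exact on the ASCII domain Dom_parse admits
def pyIsdigit (c : Char) : Bool := 48 ≤ c.toNat && c.toNat ≤ 57
def pyIsalpha (c : Char) : Bool := (97 ≤ c.toNat && c.toNat ≤ 122) || (65 ≤ c.toNat && c.toNat ≤ 90)
-- 'get_data(' + val + ')'
def gd (val : List Char) : List Char := "get_data(".toList ++ val ++ [')']
-- ' ' + c + ' '
def opsp (c : Char) : List Char := [' ', c, ' ']
def barSep : List Char := ".' '.".toList

-- ===== PORT A =====
-- A's single character loop; state = (calculation, val, number, cmd)
def loopA : List Char → (List Char × List Char × Bool × List Char) → (List Char × List Char × Bool × List Char)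
  | [], st => st
  | c :: cs, (cal, val, number, cmd) =>
    if pyIsdigit c then loopA cs (cal, val ++ [c], number, cmd)
    else if pyIsalpha c then loopA cs (cal, val, number, cmd ++ [c])
    else if c = '#' then loopA cs (cal, val, true, cmd)
    else if c = '+' ∨ c = '-' ∨ c = '*' ∨ c = '(' ∨ c = ')' ∨ c = ',' then
      (if number then loopA cs (cal ++ val ++ opsp c, [], false, cmd)
       else if cmd ≠ [] then loopA cs (cal ++ cmd ++ opsp c, [], false, [])
       else loopA cs (cal ++ gd val ++ opsp c, [], false, cmd))
    else if c = '|' then loopA cs (cal ++ gd val ++ barSep, [], false, cmd)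
    else loopA cs (cal, val, number, cmd)

-- A's trailing 'if val:' block
def finishA (st : List Char × List Char × Bool × List Char) : List Char :=
  let (cal, val, number, _) := st
  if val ≠ [] then (if number then cal ++ val else cal ++ gd val) else cal

def parse (expression : String) : String :=
  if expression = "%" then "get_data(-1)"
  else
    let e := expression.toList
    if PySem.Chars.startswith e ['`'] then String.ofList (PySem.List.slice e (some 1) none)
    else if PySem.Chars.startswith e ['@'] then
      String.ofList ("get_data(\"".toList ++ PySem.List.slice e (some 1) none ++ "\")".toList)
    else if PySem.Chars.isIn [':'] e then
      String.ofList ("get_data('".toList ++ e ++ "')".toList)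
    else if PySem.Chars.isIn ['>'] e then
      let nums := PySem.Chars.splitOn e ['>']
      let a := gd (nums.getD 0 [])
      let b := gd (nums.getD 1 [])
      String.ofList (['('] ++ a ++ " > ".toList ++ b ++ " ? ".toList ++ a ++ " : '')".toList)
    else if PySem.Chars.isIn ['^'] e then
      let nums := PySem.Chars.splitOn e ['^']
      let a := gd (nums.getD 0 [])
      let b := gd (nums.getD 1 [])
      String.ofList (['('] ++ a ++ " ? ".toList ++ a ++ " : ".toList ++ b ++ [')'])
    else
      String.ofList ('(' :: finishA (loopA e ([], [], false, [])) ++ [')'])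

-- ===== PORT B =====
-- B's tokens: a digit run, an alpha run, '#', an operator char, or '|'
inductive Tok : Type
  | num : List Char → Tok
  | word : List Char → Tok
  | hash : Tok
  | op : Char → Tok
  | bar : Tok
deriving DecidableEq, Repr

-- pass 1: the lexer (Source B's _lex)
def lexB : List Char → List Tok
  | [] => []
  | c :: cs =>
    if pyIsdigit c then Tok.num (c :: cs.takeWhile pyIsdigit) :: lexB (cs.dropWhile pyIsdigit)
    else if pyIsalpha c then Tok.word (c :: cs.takeWhile pyIsalpha) :: lexB (cs.dropWhile pyIsalpha)
    else if c = '#' then Tok.hash :: lexB cs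
    else if c = '+' ∨ c = '-' ∨ c = '*' ∨ c = '(' ∨ c = ')' ∨ c = ',' then Tok.op c :: lexB cs
    else if c = '|' then Tok.bar :: lexB cs
    else lexB cs
termination_by cs => cs.length
decreasing_by
  · simpa using Nat.lt_succ_of_le (List.length_dropWhile_le _ _)
  · simpa using Nat.lt_succ_of_le (List.length_dropWhile_le _ _)
  all_goals simp

-- pass 2: fold over the token list, same state shape as Source B's second loop
def loopB : List Tok → (List Char × List Char × Bool × List Char) → (List Char × List Char × Bool × List Char)
  | [], st => st
  | t :: ts, (cal, val, number, cmd) =>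
    match t with
    | Tok.num ds => loopB ts (cal, val ++ ds, number, cmd)
    | Tok.word ws => loopB ts (cal, val, number, cmd ++ ws)
    | Tok.hash => loopB ts (cal, val, true, cmd)
    | Tok.op c =>
      if number then loopB ts (cal ++ val ++ opsp c, [], false, cmd)
      else if cmd ≠ [] then loopB ts (cal ++ cmd ++ opsp c, [], false, [])
      else loopB ts (cal ++ gd val ++ opsp c, [], false, cmd)
    | Tok.bar => loopB ts (cal ++ gd val ++ barSep, [], false, cmd)

-- Source B's trailing 'if val:' line
def finishB (st : List Char × List Char × Bool × List Char) : List Char :=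
  let (cal, val, number, _) := st
  if val ≠ [] then cal ++ (if number then val else gd val) else cal

-- "(%s ...)" bodies of Source B's 'for sep in '>^'' loop
def cmpFmt (sep : Char) (e : List Char) : String :=
  let parts := PySem.Chars.splitOn e [sep]
  let a := gd (parts.getD 0 [])
  let b := gd (parts.getD 1 [])
  if sep = '>' then String.ofList (['('] ++ a ++ " > ".toList ++ b ++ " ? ".toList ++ a ++ " : '')".toList)
  else String.ofList (['('] ++ a ++ " ? ".toList ++ a ++ " : ".toList ++ b ++ [')'])

-- Source B's 'for sep in '>^': if sep in expression: return …' (none = loop fell through)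
def cmpLoop : List Char → List Char → Option String
  | [], _ => none
  | sep :: seps, e => if PySem.Chars.isIn [sep] e then some (cmpFmt sep e) else cmpLoop seps e

def parse_alt (expression : String) : String :=
  if expression = "%" then "get_data(-1)"
  else
    let e := expression.toList
    let head := PySem.List.slice e none (some 1)
    let rest := PySem.List.slice e (some 1) none
    if head = ['`'] then String.ofList rest
    else if head = ['@'] then String.ofList ("get_data(\"".toList ++ rest ++ "\")".toList)
    else if PySem.Chars.isIn [':'] e then String.ofList ("get_data('".toList ++ e ++ "')".toList)
    else
      match cmpLoop ['>', '^'] e with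
      | some s => s
      | none => String.ofList ('(' :: finishB (loopB (lexB e) ([], [], false, [])) ++ [')'])

-- ===== PRECONDITION & SPEC =====
def Spec_parse (expression : String) (out : String) : Prop := out = parse_alt expression
instance (expression : String) (out : String) : Decidable (Spec_parse expression out) := by unfold Spec_parse; infer_instance

-- ===== CLAIM (what is proved, stated in full; the proofs are below) =====
def Claim_equal_parse : Prop := ∀ (expression : String), Dom_parse expression → Spec_parse expression (parse expression)

-- ===== LEMMAS AND PROOFS =====

lemma alpha_not_digit (c : Char) (h : pyIsalpha c = true) : pyIsdigit c = false := by
  simp [pyIsalpha, pyIsdigit] at *; omega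

lemma startswith_single (c : Char) (e : List Char) :
    PySem.Chars.startswith e [c] = true ↔ PySem.List.slice e none (some 1) = [c] := by
  rw [PySem.Chars.startswith_iff]
  cases e with
  | nil => simp [PySem.List.slice]
  | cons a t =>
    constructor
    · rintro ⟨u, hu⟩
      cases hu
      simp [PySem.List.slice_to]
    · intro h
      simp [PySem.List.slice_to] at h
      subst h
      exact ⟨t, rfl⟩

lemma finishB_eq_finishA (st : List Char × List Char × Bool × List Char) :
    finishB st = finishA st := by
  obtain ⟨cal, val, number, cmd⟩ := st
  simp only [finishA, finishB]
  split_ifs <;> rfl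

lemma digit_run (ds : List Char) (h : ∀ d ∈ ds, pyIsdigit d = true) :
    ∀ (cs cal val : List Char) (number : Bool) (cmd : List Char),
      loopA (ds ++ cs) (cal, val, number, cmd) = loopA cs (cal, val ++ ds, number, cmd) := by
  induction ds with
  | nil => intro cs cal val number cmd; simp
  | cons d ds ih =>
    intro cs cal val number cmd
    have hd : pyIsdigit d = true := h d (by simp)
    simp only [List.cons_append, loopA, hd, if_true]
    rw [ih (fun x hx => h x (by simp [hx]))]
    simp

lemma alpha_run (ws : List Char) (h : ∀ w ∈ ws, pyIsalpha w = true) :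
    ∀ (cs cal val : List Char) (number : Bool) (cmd : List Char),
      loopA (ws ++ cs) (cal, val, number, cmd) = loopA cs (cal, val, number, cmd ++ ws) := by
  induction ws with
  | nil => intro cs cal val number cmd; simp
  | cons w ws ih =>
    intro cs cal val number cmd
    have hw : pyIsalpha w = true := h w (by simp)
    simp only [List.cons_append, loopA, alpha_not_digit w hw, hw, if_true, Bool.false_eq_true,
      if_false]
    rw [ih (fun x hx => h x (by simp [hx]))]
    simp

lemma lex_loop (cs : List Char) :
    ∀ (cal val : List Char) (number : Bool) (cmd : List Char),
      loopB (lexB cs) (cal, val, number, cmd) = loopA cs (cal, val, number, cmd) := by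
  induction cs using lexB.induct with
  | case1 => intro cal val number cmd; simp [lexB, loopB, loopA]
  | case2 c cs hd ih =>
    intro cal val number cmd
    rw [lexB]
    simp only [hd, if_true, loopB]
    rw [ih]
    have := digit_run (cs.takeWhile pyIsdigit)
      (fun x hx => List.mem_takeWhile_imp hx)
      (cs.dropWhile pyIsdigit) cal (val ++ [c]) number cmd
    rw [List.takeWhile_append_dropWhile] at this
    simp only [loopA, hd, if_true, this, List.append_assoc, List.singleton_append]
  | case3 c cs hd ha ih =>
    intro cal val number cmd
    rw [lexB]
    simp only [hd, ha, if_true, Bool.false_eq_true, if_false, loopB]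
    rw [ih]
    have := alpha_run (cs.takeWhile pyIsalpha)
      (fun x hx => List.mem_takeWhile_imp hx)
      (cs.dropWhile pyIsalpha) cal val number (cmd ++ [c])
    rw [List.takeWhile_append_dropWhile] at this
    simp only [loopA, hd, ha, if_true, Bool.false_eq_true, if_false, this, List.append_assoc,
      List.singleton_append]
  | case4 cs hd ha ih =>
    intro cal val number cmd
    rw [lexB]
    simp only [hd, ha, Bool.false_eq_true, if_false, reduceIte, loopB, loopA]
    exact ih _ _ _ _
  | case5 c cs hd ha hh hop ih =>
    intro cal val number cmd
    rw [lexB]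
    simp only [hd, ha, hh, hop, if_true, Bool.false_eq_true, if_false, loopB, loopA]
    split_ifs <;> exact ih _ _ _ _
  | case6 cs hd ha hh hop ih =>
    intro cal val number cmd
    rw [lexB]
    simp only [hd, ha, hh, hop, Bool.false_eq_true, if_false, reduceIte, loopB, loopA]
    exact ih _ _ _ _
  | case7 c cs hd ha hh hop hb ih =>
    intro cal val number cmd
    rw [lexB]
    simp only [hd, ha, hh, hop, hb, Bool.false_eq_true, if_false, loopA]
    exact ih _ _ _ _

-- ===== VERDICT (by name: the statement is the Claim_ definition above) =====
theorem parse_spec : Claim_equal_parse := by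
  intro expression _
  unfold Spec_parse parse parse_alt
  by_cases h0 : expression = "%"
  · simp [h0]
  simp only [h0, if_false]
  by_cases h1 : PySem.Chars.startswith expression.toList ['`'] = true
  · simp [h1, (startswith_single '`' expression.toList).mp h1]
  by_cases h2 : PySem.Chars.startswith expression.toList ['@'] = true
  · have := (startswith_single '@' expression.toList).mp h2
    simp [h1, h2, this]
  have h1' : ¬ PySem.List.slice expression.toList none (some 1) = ['`'] :=
    fun h => h1 ((startswith_single '`' expression.toList).mpr h)
  have h2' : ¬ PySem.List.slice expression.toList none (some 1) = ['@'] :=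
    fun h => h2 ((startswith_single '@' expression.toList).mpr h)
  simp only [h1, h2, h1', h2', if_false, Bool.false_eq_true]
  by_cases h3 : PySem.Chars.isIn [':'] expression.toList = true
  · simp [h3]
  simp only [h3, if_false, Bool.false_eq_true, cmpLoop]
  by_cases h4 : PySem.Chars.isIn ['>'] expression.toList = true
  · simp [h4, cmpFmt]
  simp only [h4, if_false, Bool.false_eq_true]
  by_cases h5 : PySem.Chars.isIn ['^'] expression.toList = true
  · simp [h5, cmpFmt]
  simp only [h5, if_false, Bool.false_eq_true]
  rw [lex_loop, finishB_eq_finishA]
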